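-- pv_equiv track=rewrite | github.com/kaviyavarshini08/DAA0666 | CHAPTER 5.py | canAssign
-- ===== SOURCE A (Python) =====
-- def canAssign(jobs, k, max_time):
--     workers = [0] * k
--
--     def backtrack(index):
--         if index == len(jobs):
--             return True
--         for i in range(k):
--             if workers[i] + jobs[index] <= max_time:
--                 workers[i] += jobs[index]
--                 if backtrack(index + 1):
--                     return True
--                 workers[i] -= jobs[index]
--             if workers[i] == 0:
--                 break
--         return False
--
--     jobs.sort(reverse=True)
--     return backtrack(0)
-- ===== SOURCE B (Python) =====
-- def canAssign(jobs, k, max_time):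
--     # Iterative depth-first search with an explicit stack of (next job index,
--     # worker-loads tuple) states, instead of recursion.  Same in-place
--     # descending sort of `jobs` as the original.
--     jobs.sort(reverse=True)
--     n = len(jobs)
--     stack = [(0, (0,) * k)]
--     while stack:
--         index, w = stack.pop()
--         if index == n:
--             return True
--         children = []
--         for i in range(k):
--             if w[i] + jobs[index] <= max_time:
--                 children.append((index + 1, w[:i] + (w[i] + jobs[index],) + w[i + 1:]))
--             if w[i] == 0:
--                 break
--         stack.extend(reversed(children))
--     return False
-- ===== Notes on version B (the rewrite author's own statement) =====
-- stated objective: alternative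
-- what changed: Replaces the recursive backtracking closure that mutates a shared worker-loads array with an iterative depth-first search over an explicit stack of (job index, immutable loads tuple) states whose children are generated eagerly per state, avoiding Python's recursion depth limit.
import Mathlib
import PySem

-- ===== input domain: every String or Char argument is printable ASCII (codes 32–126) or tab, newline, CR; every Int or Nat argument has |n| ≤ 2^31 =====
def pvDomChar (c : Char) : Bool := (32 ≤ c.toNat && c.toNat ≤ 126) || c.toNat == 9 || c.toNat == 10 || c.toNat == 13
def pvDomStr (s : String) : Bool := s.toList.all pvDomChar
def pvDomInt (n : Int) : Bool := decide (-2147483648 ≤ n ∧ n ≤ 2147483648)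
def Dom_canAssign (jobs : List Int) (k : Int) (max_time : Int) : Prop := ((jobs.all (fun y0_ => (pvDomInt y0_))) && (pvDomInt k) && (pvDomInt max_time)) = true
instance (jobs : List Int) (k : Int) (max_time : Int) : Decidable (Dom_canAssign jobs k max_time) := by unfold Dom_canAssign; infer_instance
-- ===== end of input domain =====

-- B replaces A's recursive backtracking over a mutated loads array by an iterative
-- explicit-stack depth-first search over (job index, loads) states (objective:
-- alternative decomposition, same cost).  Both sort `jobs` in place (Python side);
-- the equivalence proved here is about the return value.

-- ===== PORT A =====
-- backtrack(index) with its inner `for i in range(k)` loop; `workers` is threaded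
-- functionally since every mutation is undone on failure.  The `index < jobs.length`
-- and `i < kn` guards only make the recursion total (unreachable otherwise).
mutual
def pvBtA (jobs : List Int) (kn : Nat) (mt : Int) (index : Nat) (w : List Int) : Bool :=
  if index = jobs.length then true
  else pvLoopA jobs kn mt index w 0
termination_by (jobs.length - index, 1, 0)

def pvLoopA (jobs : List Int) (kn : Nat) (mt : Int) (index : Nat) (w : List Int) (i : Nat) : Bool :=
  if hk : i < kn then
    if hi : index < jobs.length then
      let job := jobs.getD index 0
      let wi := w.getD i 0
      if wi + job ≤ mt then
        if pvBtA jobs kn mt (index + 1) (w.set i (wi + job)) then true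
        else if wi = 0 then false else pvLoopA jobs kn mt index w (i + 1)
      else if wi = 0 then false else pvLoopA jobs kn mt index w (i + 1)
    else false
  else false
termination_by (jobs.length - index, 0, kn - i)
decreasing_by
  · exact Prod.Lex.left _ _ (by omega)
  · exact Prod.Lex.right _ (Prod.Lex.right _ (by omega))
  · exact Prod.Lex.right _ (Prod.Lex.right _ (by omega))
end

def canAssign (jobs : List Int) (k : Int) (max_time : Int) : Bool :=
  let sortedJobs := PySem.List.sorted jobs (fun x => x) true   -- jobs.sort(reverse=True)
  pvBtA sortedJobs k.toNat max_time 0 (List.replicate k.toNat 0)  -- workers = [0] * k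

-- ===== PORT B =====
-- the `children` list built by B's inner for-loop for one popped state
def pvChildren (jobs : List Int) (kn : Nat) (mt : Int) (index : Nat) (w : List Int) (i : Nat) : List (Nat × List Int) :=
  if _hk : i < kn then
    if index < jobs.length then
      let job := jobs.getD index 0
      let wi := w.getD i 0
      (if wi + job ≤ mt then [(index + 1, w.set i (wi + job))] else []) ++
      (if wi = 0 then [] else pvChildren jobs kn mt index w (i + 1))
    else []
  else []
termination_by kn - i

-- termination measure for the stack loop (helper cited by pvDfsB's decreasing_by)
def pvMeas (l kn : Nat) : List (Nat × List Int) → Nat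
  | [] => 0
  | (idx, _) :: rest => (kn + 1) ^ (l + 1 - idx) + pvMeas l kn rest

theorem pvMeas_append (l kn : Nat) (a b : List (Nat × List Int)) :
    pvMeas l kn (a ++ b) = pvMeas l kn a + pvMeas l kn b := by
  induction a with
  | nil => simp [pvMeas]
  | cons x t ih => cases x; simp [pvMeas, ih]; omega

theorem pvChildren_nil_of_ge (jobs : List Int) (kn : Nat) (mt : Int) (index : Nat)
    (w : List Int) (i : Nat) (h : ¬ index < jobs.length) :
    pvChildren jobs kn mt index w i = [] := by
  rw [pvChildren]
  split_ifs <;> rfl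

theorem pvMeas_children_le (jobs : List Int) (kn : Nat) (mt : Int) (index : Nat)
    (w : List Int) : ∀ m i, kn - i ≤ m →
    pvMeas jobs.length kn (pvChildren jobs kn mt index w i) ≤ (kn - i) * (kn + 1) ^ (jobs.length - index) := by
  intro m
  induction m with
  | zero =>
    intro i h
    have hk : ¬ i < kn := by omega
    rw [pvChildren]
    simp [hk, pvMeas]
  | succ m ih =>
    intro i h
    rw [pvChildren]
    by_cases hk : i < kn
    · rw [dif_pos hk]
      by_cases hi : index < jobs.length
      · rw [if_pos hi, pvMeas_append]
        have hfitle : pvMeas jobs.length kn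
            (if w[i]?.getD 0 + jobs[index]?.getD 0 ≤ mt
              then [(index + 1, w.set i (w[i]?.getD 0 + jobs[index]?.getD 0))] else [])
            ≤ (kn + 1) ^ (jobs.length - index) := by
          by_cases hfit : w[i]?.getD 0 + jobs[index]?.getD 0 ≤ mt
          · rw [if_pos hfit]
            have he : jobs.length + 1 - (index + 1) = jobs.length - index := by omega
            simp [pvMeas, he]
          · rw [if_neg hfit]; simp [pvMeas]
        have hrecle : pvMeas jobs.length kn
            (if w[i]?.getD 0 = 0 then [] else pvChildren jobs kn mt index w (i + 1))
            ≤ (kn - (i + 1)) * (kn + 1) ^ (jobs.length - index) := by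
          by_cases hz : w[i]?.getD 0 = 0
          · rw [if_pos hz]; simp [pvMeas]
          · rw [if_neg hz]; exact ih (i + 1) (by omega)
        have hsplit : kn - i = (kn - (i + 1)) + 1 := by omega
        calc pvMeas jobs.length kn _ + pvMeas jobs.length kn _
            ≤ (kn + 1) ^ (jobs.length - index) + (kn - (i + 1)) * (kn + 1) ^ (jobs.length - index) :=
              Nat.add_le_add hfitle hrecle
          _ = ((kn - (i + 1)) + 1) * (kn + 1) ^ (jobs.length - index) := by ring
          _ = (kn - i) * (kn + 1) ^ (jobs.length - index) := by rw [← hsplit]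
      · rw [if_neg hi]; simp [pvMeas]
    · rw [dif_neg hk]; simp [pvMeas]

theorem pvMeas_step_lt (jobs : List Int) (kn : Nat) (mt : Int) (index : Nat)
    (w : List Int) (rest : List (Nat × List Int)) :
    pvMeas jobs.length kn (pvChildren jobs kn mt index w 0 ++ rest)
      < pvMeas jobs.length kn ((index, w) :: rest) := by
  rw [pvMeas_append]
  show _ < (kn + 1) ^ (jobs.length + 1 - index) + pvMeas jobs.length kn rest
  by_cases hi : index < jobs.length
  · have hle := pvMeas_children_le jobs kn mt index w kn 0 (by omega)
    have hpow : (kn + 1) ^ (jobs.length + 1 - index) = (kn + 1) * (kn + 1) ^ (jobs.length - index) := by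
      rw [← pow_succ']
      congr 1
      omega
    have hp : 0 < (kn + 1) ^ (jobs.length - index) := Nat.pow_pos (by omega)
    have hlt : (kn - 0) * (kn + 1) ^ (jobs.length - index) < (kn + 1) * (kn + 1) ^ (jobs.length - index) :=
      Nat.mul_lt_mul_of_lt_of_le (by omega) le_rfl hp
    omega
  · rw [pvChildren_nil_of_ge jobs kn mt index w 0 hi]
    have hp : 0 < (kn + 1) ^ (jobs.length + 1 - index) := Nat.pow_pos (by omega)
    simp [pvMeas]

-- the while-loop over the explicit stack (stack top = list head)
def pvDfsB (jobs : List Int) (kn : Nat) (mt : Int) : List (Nat × List Int) → Bool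
  | [] => false
  | (index, w) :: rest =>
    if index = jobs.length then true
    else pvDfsB jobs kn mt (pvChildren jobs kn mt index w 0 ++ rest)
termination_by st => pvMeas jobs.length kn st
decreasing_by
  exact pvMeas_step_lt jobs kn mt index w rest

def canAssign_alt (jobs : List Int) (k : Int) (max_time : Int) : Bool :=
  let sortedJobs := PySem.List.sorted jobs (fun x => x) true   -- jobs.sort(reverse=True)
  pvDfsB sortedJobs k.toNat max_time [(0, List.replicate k.toNat 0)]  -- stack = [(0, (0,)*k)]

-- ===== PRECONDITION & SPEC =====
def Spec_canAssign (jobs : List Int) (k : Int) (max_time : Int) (out : Bool) : Prop := out = canAssign_alt jobs k max_time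
instance (jobs : List Int) (k : Int) (max_time : Int) (out : Bool) : Decidable (Spec_canAssign jobs k max_time out) := by unfold Spec_canAssign; infer_instance

-- ===== CLAIM (what is proved, stated in full; the proofs are below) =====
def Claim_equal_canAssign : Prop := ∀ (jobs : List Int) (k : Int) (max_time : Int), Dom_canAssign jobs k max_time → Spec_canAssign jobs k max_time (canAssign jobs k max_time)

-- ===== LEMMAS AND PROOFS =====

-- A's inner loop returns true iff some child state of B's child list succeeds
theorem pvLoopA_eq_any (jobs : List Int) (kn : Nat) (mt : Int) (index : Nat) (w : List Int) :
    ∀ m i, kn - i ≤ m →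
    pvLoopA jobs kn mt index w i
      = (pvChildren jobs kn mt index w i).any (fun c => pvBtA jobs kn mt c.1 c.2) := by
  intro m
  induction m with
  | zero =>
    intro i h
    have hk : ¬ i < kn := by omega
    rw [pvLoopA, pvChildren]
    simp [hk]
  | succ m ih =>
    intro i h
    rw [pvLoopA, pvChildren]
    by_cases hk : i < kn
    · rw [dif_pos hk, dif_pos hk]
      by_cases hi : index < jobs.length
      · rw [dif_pos hi, if_pos hi]
        dsimp only
        simp only [List.getD_eq_getElem?_getD]
        by_cases hfit : w[i]?.getD 0 + jobs[index]?.getD 0 ≤ mt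
        · rw [if_pos hfit, if_pos hfit]
          cases hb : pvBtA jobs kn mt (index + 1) (w.set i (w[i]?.getD 0 + jobs[index]?.getD 0)) with
          | true => simp [hb]
          | false =>
            by_cases hz : w[i]?.getD 0 = 0
            · simp only [hz, zero_add] at hb
              simp [hb, hz]
            · simp [hb, hz, ih (i + 1) (by omega)]
        · rw [if_neg hfit, if_neg hfit]
          by_cases hz : w[i]?.getD 0 = 0
          · simp [hz]
          · simp [hz, ih (i + 1) (by omega)]
      · rw [dif_neg hi, if_neg hi]; simp
    · rw [dif_neg hk, dif_neg hk]; simp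

-- the stack loop returns true iff A's backtracking succeeds from some stacked state
theorem pvDfsB_eq_any (jobs : List Int) (kn : Nat) (mt : Int) :
    ∀ n st, pvMeas jobs.length kn st ≤ n →
    pvDfsB jobs kn mt st = st.any (fun s => pvBtA jobs kn mt s.1 s.2) := by
  intro n
  induction n with
  | zero =>
    intro st h
    cases st with
    | nil => simp [pvDfsB]
    | cons s rest =>
      exfalso
      obtain ⟨index, w⟩ := s
      have hp : 0 < (kn + 1) ^ (jobs.length + 1 - index) := Nat.pow_pos (by omega)
      simp [pvMeas] at h
  | succ n ih =>
    intro st h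
    cases st with
    | nil => simp [pvDfsB]
    | cons s rest =>
      obtain ⟨index, w⟩ := s
      rw [pvDfsB]
      by_cases hidx : index = jobs.length
      · rw [if_pos hidx]
        have hbt : pvBtA jobs kn mt index w = true := by rw [pvBtA]; simp [hidx]
        simp [hbt]
      · rw [if_neg hidx]
        have hlt := pvMeas_step_lt jobs kn mt index w rest
        rw [ih _ (by omega), List.any_append]
        have hbt : pvBtA jobs kn mt index w
            = (pvChildren jobs kn mt index w 0).any (fun c => pvBtA jobs kn mt c.1 c.2) := by
          rw [pvBtA]
          rw [if_neg hidx]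
          exact pvLoopA_eq_any jobs kn mt index w kn 0 (by omega)
        simp [hbt]

-- ===== VERDICT (by name: the statement is the Claim_ definition above) =====
theorem canAssign_spec : Claim_equal_canAssign := by
  intro jobs k max_time _
  unfold Spec_canAssign canAssign canAssign_alt
  rw [pvDfsB_eq_any _ _ _ _ _ le_rfl]
  simp
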